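-- pv_equiv track=rewrite | github.com/dividing-by-zaro/nv-malpractice-explorer | scripts/batch/process_complaints.py | find_complaint_pairs
-- ===== SOURCE A (Python) =====
-- COMPLAINT_PRIORITY = {
--     "Complaint": 1,
--     "Complaint and Request for Summary Suspension": 1,
--     "Amended Complaint": 2,
--     "First Amended Complaint": 2,
--     "Second Amended Complaint": 3,
--     "Third Amended Complaint": 4,
-- }
--
-- def find_complaint_pairs(filings: list[dict]) -> list[tuple[dict, dict | None]]:
--     """
--     Find complaint pairs: (primary_complaint, original_complaint_or_none).
--
--     For each case, returns:
--     - primary_complaint: The highest priority version (amended if exists)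
--     - original_complaint: The original complaint if primary is amended, else None
--     """
--     # Filter to only complaints
--     complaints = [f for f in filings if f.get("type") in COMPLAINT_PRIORITY]
--
--     # Group all versions by case_number
--     by_case: dict[str, list[tuple[dict, int]]] = {}
--     for filing in complaints:
--         case_num = filing["case_number"]
--         priority = COMPLAINT_PRIORITY.get(filing["type"], 0)
--         if case_num not in by_case:
--             by_case[case_num] = []
--         by_case[case_num].append((filing, priority))
--
--     # For each case, identify primary (highest priority) and original (if different)
--     result = []
--     for case_num, entries in by_case.items():
--         entries.sort(key=lambda x: x[1])  # Sort by priority ascending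
--         primary = entries[-1][0]  # Highest priority
--
--         # Find original if it exists and is different from primary
--         original = None
--         if len(entries) > 1 and entries[0][1] < entries[-1][1]:
--             # There's a lower priority version (original)
--             original = entries[0][0]
--
--         result.append((primary, original))
--
--     return result
-- ===== SOURCE B (Python) =====
-- COMPLAINT_PRIORITY = {
--     "Complaint": 1,
--     "Complaint and Request for Summary Suspension": 1,
--     "Amended Complaint": 2,
--     "First Amended Complaint": 2,
--     "Second Amended Complaint": 3,
--     "Third Amended Complaint": 4,
-- }
--
-- def find_complaint_pairs(filings: list[dict]) -> list[tuple[dict, dict | None]]: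
--     """Single linear pass: per case track the first filing of minimal priority,
--     the last filing of maximal priority, and the count, instead of grouping
--     all versions into lists and sorting each group."""
--     stats = {}  # case_number -> [first_min_filing, min_p, last_max_filing, max_p, count]
--     for f in filings:
--         t = f.get("type")
--         if t not in COMPLAINT_PRIORITY:
--             continue
--         p = COMPLAINT_PRIORITY[t]
--         c = f["case_number"]
--         s = stats.get(c)
--         if s is None:
--             stats[c] = [f, p, f, p, 1]
--         else:
--             if p < s[1]:
--                 s[0], s[1] = f, p
--             if p >= s[3]:
--                 s[2], s[3] = f, p
--             s[4] += 1
--     return [(s[2], s[0] if s[4] > 1 and s[1] < s[3] else None)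
--             for s in stats.values()]
-- ===== Notes on version B (the rewrite author's own statement) =====
-- stated objective: alternative
-- what changed: Replaces the filter + group-into-lists + per-group stable sort with one linear pass that keeps, per case, only the first minimal-priority filing, the last maximal-priority filing and a count, exploiting that a stable ascending sort's first/last elements are exactly those.
import Mathlib
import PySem

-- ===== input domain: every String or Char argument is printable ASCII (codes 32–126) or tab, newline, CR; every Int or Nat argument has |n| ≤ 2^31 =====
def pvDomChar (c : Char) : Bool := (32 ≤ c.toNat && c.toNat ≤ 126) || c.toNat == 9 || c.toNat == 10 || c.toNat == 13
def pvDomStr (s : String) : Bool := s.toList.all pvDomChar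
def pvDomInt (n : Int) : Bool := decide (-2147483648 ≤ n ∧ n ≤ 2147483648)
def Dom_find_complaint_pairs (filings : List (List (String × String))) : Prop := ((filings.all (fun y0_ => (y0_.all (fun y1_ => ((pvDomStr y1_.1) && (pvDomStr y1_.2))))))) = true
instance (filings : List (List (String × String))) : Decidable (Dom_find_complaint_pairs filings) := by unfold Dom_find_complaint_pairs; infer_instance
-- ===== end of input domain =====

-- B replaces A's filter + group-into-lists + per-group stable sort by ONE linear pass that keeps,
-- per case, only the first minimal-priority filing, the last maximal-priority filing and a count
-- (the head and last element of A's stable ascending sort). Objective: alternative algorithm.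

-- ===== PORT A =====
-- shared helpers: the module constant COMPLAINT_PRIORITY and Python dict lookups on a filing
def pvPRI : PySem.Dict String Int := PySem.Dict.mk
  [("Complaint", 1), ("Complaint and Request for Summary Suspension", 1),
   ("Amended Complaint", 2), ("First Amended Complaint", 2),
   ("Second Amended Complaint", 3), ("Third Amended Complaint", 4)]

-- f.get(k) / f[k] on a filing dict (assoc list, first match)
def pvGet (f : List (String × String)) (k : String) : Option String := (PySem.Dict.mk f).get? k

-- f.get("type") in COMPLAINT_PRIORITY  (None is never a key)
def pvIsComplaint (f : List (String × String)) : Bool :=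
  match pvGet f "type" with
  | some t => pvPRI.contains t
  | none => false

-- COMPLAINT_PRIORITY.get(filing["type"], 0); the none branch is unreachable for a complaint
def pvPriA (f : List (String × String)) : Int :=
  match pvGet f "type" with
  | some t => pvPRI.getD t 0
  | none => 0

def pvDflt : (List (String × String)) × Int := ([], 0)

def find_complaint_pairs (filings : List (List (String × String))) : List ((List (String × String)) × (Option (List (String × String)))) :=
  let complaints := filings.filter pvIsComplaint
  let by_case : PySem.Dict String (List ((List (String × String)) × Int)) :=
    complaints.foldl (fun d f =>
      match pvGet f "case_number" with
      | some c => d.modify c [] (fun es => es ++ [(f, pvPriA f)])  -- 'if not in: []' then append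
      | none => d   -- Python raises KeyError here; excluded by Pre_
      ) PySem.Dict.empty
  by_case.items.foldl (fun result pr =>
    let entries := PySem.List.sorted pr.2 (fun x => x.2) false     -- entries.sort(key=…) (in place)
    let primary := (PySem.List.pyGetD entries (-1) pvDflt).1       -- entries[-1][0]; never empty
    let original : Option (List (String × String)) :=
      if 1 < PySem.List.len entries ∧
         (PySem.List.pyGetD entries 0 pvDflt).2 < (PySem.List.pyGetD entries (-1) pvDflt).2
      then some (PySem.List.pyGetD entries 0 pvDflt).1 else none
    result ++ [(primary, original)]) []

-- ===== PORT B =====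
-- per-case running state: (first_min_filing, min_p, last_max_filing, max_p, count)
def pvStep (s : (List (String × String)) × Int × (List (String × String)) × Int × Int)
    (f : List (String × String)) (p : Int) :
    (List (String × String)) × Int × (List (String × String)) × Int × Int :=
  let fm := if p < s.2.1 then f else s.1
  let mp := if p < s.2.1 then p else s.2.1
  let lm := if p ≥ s.2.2.2.1 then f else s.2.2.1
  let xp := if p ≥ s.2.2.2.1 then p else s.2.2.2.1
  (fm, mp, lm, xp, s.2.2.2.2 + 1)

def find_complaint_pairs_alt (filings : List (List (String × String))) : List ((List (String × String)) × (Option (List (String × String)))) :=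
  let stats : PySem.Dict String ((List (String × String)) × Int × (List (String × String)) × Int × Int) :=
    filings.foldl (fun d f =>
      match pvGet f "type" with
      | none => d                                   -- t not in COMPLAINT_PRIORITY: continue
      | some t =>
        if pvPRI.contains t then
          let p := pvPRI.getD t 0
          match pvGet f "case_number" with
          | some c =>
            match d.get? c with
            | none => d.insert c (f, p, f, p, 1)
            | some s => d.insert c (pvStep s f p)
          | none => d   -- Python raises KeyError here; excluded by Pre_
        else d) PySem.Dict.empty
  stats.values.map (fun s =>
    (s.2.2.1, if 1 < s.2.2.2.2 ∧ s.2.1 < s.2.2.2.1 then some s.1 else none))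

-- ===== PRECONDITION & SPEC =====
-- Pre_ excludes exactly the inputs where a filing recognised as a complaint lacks the
-- "case_number" key: there both Pythons raise KeyError.
def Pre_find_complaint_pairs (filings : List (List (String × String))) : Prop :=
  ∀ f ∈ filings, pvIsComplaint f = true → (pvGet f "case_number").isSome = true
instance (filings : List (List (String × String))) : Decidable (Pre_find_complaint_pairs filings) := by unfold Pre_find_complaint_pairs; infer_instance

def pvWitness_find_complaint_pairs : (List (List (String × String))) :=
  [[("type", "Complaint"), ("case_number", "1")],
   [("type", "Amended Complaint"), ("case_number", "1")]]

def Spec_find_complaint_pairs (filings : List (List (String × String))) (out : List ((List (String × String)) × (Option (List (String × String))))) : Prop := out = find_complaint_pairs_alt filings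
instance (filings : List (List (String × String))) (out : List ((List (String × String)) × (Option (List (String × String))))) : Decidable (Spec_find_complaint_pairs filings out) := by unfold Spec_find_complaint_pairs; infer_instance

-- ===== CLAIM (what is proved, stated in full; the proofs are below) =====
def Claim_equal_find_complaint_pairs : Prop := ∀ (filings : List (List (String × String))), Dom_find_complaint_pairs filings → Pre_find_complaint_pairs filings → Spec_find_complaint_pairs filings (find_complaint_pairs filings)

-- ===== LEMMAS AND PROOFS =====

-- proof-side abbreviations
def pvCase (f : List (String × String)) : String := (pvGet f "case_number").getD ""
def pvKV (f : List (String × String)) : String × ((List (String × String)) × Int) :=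
  (pvCase f, (f, pvPriA f))

-- B's per-element state transformer, as a function of the optional previous state
def pvVStep (o : Option ((List (String × String)) × Int × (List (String × String)) × Int × Int))
    (e : (List (String × String)) × Int) :
    (List (String × String)) × Int × (List (String × String)) × Int × Int :=
  match o with
  | none => (e.1, e.2, e.1, e.2, 1)
  | some s => pvStep s e.1 e.2

def pvG (o : Option ((List (String × String)) × Int × (List (String × String)) × Int × Int))
    (es : List ((List (String × String)) × Int)) :
    Option ((List (String × String)) × Int × (List (String × String)) × Int × Int) :=
  es.foldl (fun o e => some (pvVStep o e)) o

theorem pv_insertBy_length {α : Type} (bef : α → α → Bool) (x : α) (ys : List α) :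
    (PySem.List.insertBy bef x ys).length = ys.length + 1 := by
  induction ys with
  | nil => rfl
  | cons y t ih =>
    simp only [PySem.List.insertBy]
    split <;> simp [ih]

theorem pv_insertBy_head? {α : Type} (bef : α → α → Bool) (x y : α) (t : List α) :
    (PySem.List.insertBy bef x (y :: t)).head? = some (if bef x y then x else y) := by
  simp only [PySem.List.insertBy]
  split <;> simp_all

theorem pv_insertBy_getLast? {α : Type} (key : α → Int) (x z : α) (ys : List α)
    (hp : ys.Pairwise (fun a b => key a ≤ key b)) (hz : ys.getLast? = some z) :
    (PySem.List.insertBy (fun a b => decide (key a < key b)) x ys).getLast?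
      = some (if key x < key z then z else x) := by
  induction ys generalizing z with
  | nil => simp at hz
  | cons y t ih =>
    rw [List.pairwise_cons] at hp
    simp only [PySem.List.insertBy]
    by_cases hxy : key x < key y
    · have hyz : key y ≤ key z := by
        have hmem : z ∈ y :: t := List.mem_of_getLast? hz
        rcases List.mem_cons.mp hmem with h | h
        · simp [h]
        · exact hp.1 z h
      have : key x < key z := lt_of_lt_of_le hxy hyz
      simp only [hxy, decide_true, if_true]
      cases t with
      | nil =>
        simp at hz
        subst hz
        rw [List.getLast?_cons_cons]
        simp [this]
      | cons b t' => rw [List.getLast?_cons_cons, hz]; simp [this]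
    · simp only [hxy, decide_false, Bool.false_eq_true, if_false]
      cases t with
      | nil =>
        simp at hz
        subst hz
        simp [PySem.List.insertBy, hxy]
      | cons b t' =>
        rw [List.getLast?_cons_cons] at hz
        have ht : PySem.List.insertBy (fun a b => decide (key a < key b)) x (b :: t') ≠ [] := by
          intro hnil
          have := pv_insertBy_length (fun a b => decide (key a < key b)) x (b :: t')
          rw [hnil] at this
          simp at this
        obtain ⟨w, ws, hw⟩ := List.exists_cons_of_ne_nil ht
        rw [hw, List.getLast?_cons_cons, ← hw, ih _ hp.2 hz]

-- the per-group fact: B's running state over a group is (head, last, length) of A's stable sort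
theorem pv_group (es : List ((List (String × String)) × Int)) (h : es ≠ []) :
    ∃ hd lt,
      (PySem.List.sorted es (fun x => x.2) false).head? = some hd ∧
      (PySem.List.sorted es (fun x => x.2) false).getLast? = some lt ∧
      pvG none es = some (hd.1, hd.2, lt.1, lt.2, (es.length : Int)) := by
  induction es using List.reverseRecOn with
  | nil => exact absurd rfl h
  | append_singleton es e ih =>
    by_cases hes : es = []
    · subst hes
      refine ⟨e, e, ?_, ?_, ?_⟩
      · simp [PySem.List.sorted, PySem.List.insertBy]
      · simp [PySem.List.sorted, PySem.List.insertBy]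
      · simp [pvG, pvVStep]
    · obtain ⟨hd, lt, h1, h2, h3⟩ := ih hes
      have hsplit : PySem.List.sorted (es ++ [e]) (fun x => x.2) false
          = PySem.List.insertBy (fun a b => decide (a.2 < b.2)) e
              (PySem.List.sorted es (fun x => x.2) false) := by
        rw [PySem.List.sorted_eq_foldl_insertBy, PySem.List.sorted_eq_foldl_insertBy,
          List.foldl_append]
        rfl
      obtain ⟨t, hcons⟩ := List.head?_eq_some_iff.mp h1
      have hhd' : (PySem.List.sorted (es ++ [e]) (fun x => x.2) false).head?
          = some (if e.2 < hd.2 then e else hd) := by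
        rw [hsplit, hcons, pv_insertBy_head?]
        by_cases hcmp : e.2 < hd.2 <;> simp [hcmp]
      have hlt' : (PySem.List.sorted (es ++ [e]) (fun x => x.2) false).getLast?
          = some (if e.2 < lt.2 then lt else e) := by
        rw [hsplit]
        exact pv_insertBy_getLast? (fun x => x.2) e lt _
          (PySem.List.sorted_pairwise es (fun x => x.2)) h2
      refine ⟨_, _, hhd', hlt', ?_⟩
      have hG : pvG none (es ++ [e]) = some (pvVStep (pvG none es) e) := by
        simp [pvG, List.foldl_append]
      rw [hG, h3]
      simp only [pvVStep, pvStep]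
      by_cases hc1 : e.2 < hd.2 <;> by_cases hc2 : e.2 < lt.2 <;>
        simp [hc1, hc2, le_of_not_gt]

-- a dict with nodup keys is its keys paired with their getD values
theorem pv_items_eq {V : Type} (its : List (String × V)) (d0 : V)
    (h : (PySem.Dict.mk its).keys.Nodup) :
    its = (PySem.Dict.mk its).keys.map (fun k => (k, (PySem.Dict.mk its).getD k d0)) := by
  induction its with
  | nil => rfl
  | cons p rest ih =>
    obtain ⟨k, v⟩ := p
    have hkeys : (PySem.Dict.mk ((k, v) :: rest)).keys = k :: (PySem.Dict.mk rest).keys := by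
      simp [PySem.Dict.keys]
    rw [hkeys] at h ⊢
    obtain ⟨hnot, hnd⟩ := List.nodup_cons.mp h
    simp only [List.map_cons, List.cons.injEq]
    constructor
    · simp [PySem.Dict.getD_eq_get?_getD, PySem.Dict.get?_mk_cons]
    · have hmc :
          List.map (fun k' => (k', (PySem.Dict.mk ((k, v) :: rest)).getD k' d0))
              (PySem.Dict.mk rest).keys
            = List.map (fun k' => (k', (PySem.Dict.mk rest).getD k' d0))
              (PySem.Dict.mk rest).keys := by
        apply List.map_congr_left
        intro k' hk'
        have hne : (k == k') = false := by
          simp only [beq_eq_false_iff_ne, ne_eq]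
          intro he; exact hnot (he ▸ hk')
        simp [PySem.Dict.getD_eq_get?_getD, PySem.Dict.get?_mk_cons, hne]
      calc rest = List.map (fun k' => (k', (PySem.Dict.mk rest).getD k' d0))
              (PySem.Dict.mk rest).keys := ih hnd
        _ = _ := hmc.symm

-- B's grouping fold, characterised through get?
theorem pv_bfold_get? (l : List (String × ((List (String × String)) × Int)))
    (d : PySem.Dict String ((List (String × String)) × Int × (List (String × String)) × Int × Int))
    (c : String) :
    (l.foldl (fun d p => d.insert p.1 (pvVStep (d.get? p.1) p.2)) d).get? c
      = pvG (d.get? c) ((l.filter (fun p => p.1 == c)).map (fun p => p.2)) := by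
  induction l generalizing d with
  | nil => rfl
  | cons p l ih =>
    simp only [List.foldl_cons, ih]
    by_cases hpc : p.1 = c
    · simp [hpc, pvG]
    · have hb : (p.1 == c) = false := by simp [hpc]
      have hcp : ¬ c = p.1 := fun he => hpc he.symm
      simp [hb, PySem.Dict.get?_insert, hcp]

-- default summary value (only read behind a get? that is provably some)
def pvSDflt : (List (String × String)) × Int × (List (String × String)) × Int × Int :=
  ([], 0, [], 0, 0)

theorem find_complaint_pairs_spec_aux (filings : List (List (String × String)))
    (hpre : Pre_find_complaint_pairs filings) :
    find_complaint_pairs filings = find_complaint_pairs_alt filings := by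
  have hcasekey : ∀ f ∈ filings.filter pvIsComplaint, ∃ c, pvGet f "case_number" = some c := by
    intro f hf
    exact Option.isSome_iff_exists.mp
      (hpre f (List.mem_filter.mp hf).1 (List.mem_filter.mp hf).2)
  -- canonical key/value list of the grouped complaints
  set l := (filings.filter pvIsComplaint).map pvKV with hl
  -- A's grouping fold in canonical shape
  have hA : (filings.filter pvIsComplaint).foldl (fun d f =>
        match pvGet f "case_number" with
        | some c => d.modify c [] (fun es => es ++ [(f, pvPriA f)])
        | none => d) PySem.Dict.empty
      = l.foldl (fun d p => d.modify p.1 [] (fun es => es ++ [p.2])) PySem.Dict.empty := by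
    rw [hl, List.foldl_map]
    apply PySem.List.foldl_congr_mem
    intro d f hf
    obtain ⟨c, hc⟩ := hcasekey f hf
    simp [hc, pvKV, pvCase]
  -- B's grouping fold restricted to complaints …
  have hB1 : filings.foldl (fun d f =>
        match pvGet f "type" with
        | none => d
        | some t =>
          if pvPRI.contains t then
            let p := pvPRI.getD t 0
            match pvGet f "case_number" with
            | some c =>
              match d.get? c with
              | none => d.insert c (f, p, f, p, 1)
              | some s => d.insert c (pvStep s f p)
            | none => d
          else d) PySem.Dict.empty
      = (filings.filter pvIsComplaint).foldl (fun d f =>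
          match pvGet f "case_number" with
          | some c =>
            match d.get? c with
            | none => d.insert c (f, pvPriA f, f, pvPriA f, 1)
            | some s => d.insert c (pvStep s f (pvPriA f))
          | none => d) PySem.Dict.empty := by
    rw [List.foldl_filter]
    apply PySem.List.foldl_congr_mem
    intro d f _
    rcases ht : pvGet f "type" with _ | t
    · simp [pvIsComplaint, ht]
    · by_cases hco : pvPRI.contains t = true
      · simp [pvIsComplaint, ht, hco, pvPriA]
      · simp [pvIsComplaint, ht, hco]
  -- … and in canonical shape
  have hB2 : (filings.filter pvIsComplaint).foldl (fun d f =>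
        match pvGet f "case_number" with
        | some c =>
          match d.get? c with
          | none => d.insert c (f, pvPriA f, f, pvPriA f, 1)
          | some s => d.insert c (pvStep s f (pvPriA f))
        | none => d) PySem.Dict.empty
      = l.foldl (fun d p => d.insert p.1 (pvVStep (d.get? p.1) p.2)) PySem.Dict.empty := by
    rw [hl, List.foldl_map]
    apply PySem.List.foldl_congr_mem
    intro d f hf
    obtain ⟨c, hc⟩ := hcasekey f hf
    rcases hg : d.get? c with _ | s <;>
      simp [hc, pvKV, pvCase, pvVStep, hg]
  set DA := l.foldl (fun d p => d.modify p.1 [] (fun es => es ++ [p.2])) PySem.Dict.empty with hDA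
  set DB := l.foldl (fun d p => d.insert p.1 (pvVStep (d.get? p.1) p.2)) PySem.Dict.empty with hDB
  have hKA : DA.keys = PySem.Set.update [] (l.map Prod.fst) := by
    rw [hDA, PySem.Dict.keys_foldl_modify_key l Prod.fst [] (fun _ p es => es ++ [p.2]),
      PySem.Dict.keys_empty]
  have hKB : DB.keys = PySem.Set.update [] (l.map Prod.fst) := by
    rw [hDB, PySem.Dict.keys_foldl_insert_key l Prod.fst (fun d p => pvVStep (d.get? p.1) p.2),
      PySem.Dict.keys_empty]
  have hNA : DA.keys.Nodup := by
    rw [hDA]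
    exact PySem.Dict.nodup_keys_foldl_modify_key l Prod.fst [] (fun _ p es => es ++ [p.2])
      PySem.Dict.empty (by rw [PySem.Dict.keys_empty]; exact List.nodup_nil)
  have hNB : DB.keys.Nodup := by
    rw [hDB]
    exact PySem.Dict.nodup_keys_foldl_insert_key l Prod.fst (fun d p => pvVStep (d.get? p.1) p.2)
      PySem.Dict.empty (by rw [PySem.Dict.keys_empty]; exact List.nodup_nil)
  have hgetA : ∀ c, DA.getD c [] = (l.filter (fun p => p.1 == c)).map (fun p => p.2) := by
    intro c
    rw [hDA, PySem.Dict.getD_foldl_modify_append, PySem.Dict.getD_empty, List.nil_append]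
  have hgetB : ∀ c, DB.get? c = pvG none ((l.filter (fun p => p.1 == c)).map (fun p => p.2)) := by
    intro c
    rw [hDB, pv_bfold_get?, PySem.Dict.get?_empty]
  have hIA : DA.items = DA.keys.map (fun k => (k, DA.getD k [])) := pv_items_eq DA.items [] hNA
  have hIB : DB.items = DB.keys.map (fun k => (k, DB.getD k pvSDflt)) :=
    pv_items_eq DB.items pvSDflt hNB
  -- assemble
  simp only [find_complaint_pairs, find_complaint_pairs_alt]
  rw [hA, hB1, hB2, PySem.List.foldl_append_singleton_eq_map, List.nil_append]
  simp only [PySem.Dict.values]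
  rw [hIA, hIB, hKA, hKB]
  simp only [List.map_map]
  apply List.map_congr_left
  intro c hc
  -- the group for this case key, and its nonemptiness
  set es := (l.filter (fun p => p.1 == c)).map (fun p => p.2) with hes
  have hsome : (DB.get? c).isSome := by
    rw [← PySem.Dict.contains_eq_isSome_get?, PySem.Dict.contains_iff_mem_keys, hKB]
    exact hc
  have hne : es ≠ [] := by
    intro hnil
    rw [hgetB c, ← hes, hnil] at hsome
    simp [pvG] at hsome
  obtain ⟨hd, lt, h1, h2, h3⟩ := pv_group es hne
  have hDBc : DB.getD c pvSDflt = (hd.1, hd.2, lt.1, lt.2, (es.length : Int)) := by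
    rw [PySem.Dict.getD_eq_get?_getD, hgetB c, ← hes, h3]
    rfl
  obtain ⟨t, hconsS⟩ := List.head?_eq_some_iff.mp h1
  have hssne : PySem.List.sorted es (fun x => x.2) false ≠ [] := by rw [hconsS]; simp
  have hlast : (PySem.List.sorted es (fun x => x.2) false).getLast hssne = lt :=
    Option.some_injective _ ((List.getLast?_eq_some_getLast hssne).symm.trans h2)
  simp only [Function.comp_apply, hgetA c, ← hes, hDBc]
  rw [PySem.List.pyGetD_neg_one _ _ hssne, hlast, hconsS, PySem.List.pyGetD_zero_cons,
    PySem.List.len_eq, ← hconsS, PySem.List.length_sorted]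

-- ===== VERDICT (by name: the statement is the Claim_ definition above) =====
theorem find_complaint_pairs_spec : Claim_equal_find_complaint_pairs := by
  intro filings _ hpre
  exact find_complaint_pairs_spec_aux filings hpre
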